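-- pv_equiv track=rewrite | github.com/daffycriss/TrafLight_Viol_Detector_NN | run_simulation_2.py | get_traffic_light_state
-- ===== SOURCE A (Python) =====
-- TRAFFIC_SEQ = [("red", 8), ("green", 12), ("yellow", 2)]
--
-- def get_traffic_light_state(elapsed_time):
--     cycle = sum(d for _, d in TRAFFIC_SEQ)
--     t = elapsed_time % cycle
--     acc = 0
--     for color, duration in TRAFFIC_SEQ:
--         acc += duration
--         if t < acc:
--             return color
--     return "red"
-- ===== SOURCE B (Python) =====
-- TRAFFIC_SEQ = [("red", 8), ("green", 12), ("yellow", 2)]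
--
-- _TABLE = [color for color, duration in TRAFFIC_SEQ for _ in range(duration)]
--
-- def get_traffic_light_state(elapsed_time):
--     return _TABLE[elapsed_time % len(_TABLE)]
-- ===== Notes on version B (the rewrite author's own statement) =====
-- stated objective: idiomatic
-- what changed: Replaces the per-call accumulating scan over (color,duration) pairs with a one-time expansion into a per-second lookup table (one entry per second of the cycle) indexed directly by elapsed_time modulo the cycle length.
import Mathlib
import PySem

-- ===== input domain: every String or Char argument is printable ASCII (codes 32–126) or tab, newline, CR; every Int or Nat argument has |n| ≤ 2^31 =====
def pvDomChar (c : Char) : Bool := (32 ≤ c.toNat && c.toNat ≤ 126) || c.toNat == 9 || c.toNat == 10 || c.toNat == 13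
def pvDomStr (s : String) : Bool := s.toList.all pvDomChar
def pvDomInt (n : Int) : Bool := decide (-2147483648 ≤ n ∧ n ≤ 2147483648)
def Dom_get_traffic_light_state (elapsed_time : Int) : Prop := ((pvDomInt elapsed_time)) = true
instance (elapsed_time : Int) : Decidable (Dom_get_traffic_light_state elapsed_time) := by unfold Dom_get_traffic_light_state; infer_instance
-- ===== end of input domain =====

-- B replaces A's per-call accumulating scan with a precomputed per-second lookup table
-- and a single modular index lookup (idiomatic/direct; same results).

-- ===== PORT A =====
def pvTrafficSeq : List (String × Int) := [("red", 8), ("green", 12), ("yellow", 2)]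

-- the for-loop with early return: recursion over the sequence carrying acc
def pvLoopA (t : Int) : List (String × Int) → Int → String
  | [], _ => "red"
  | (color, duration) :: rest, acc =>
      let acc := acc + duration
      if t < acc then color else pvLoopA t rest acc

def get_traffic_light_state (elapsed_time : Int) : String :=
  let cycle := pvTrafficSeq.foldl (fun a p => a + p.2) 0
  let t := PySem.Int.mod elapsed_time cycle
  pvLoopA t pvTrafficSeq 0

-- ===== PORT B =====
-- _TABLE = [color for color, duration in TRAFFIC_SEQ for _ in range(duration)]
def pvTable : List String :=
  pvTrafficSeq.foldl (fun acc p => acc ++ List.replicate p.2.toNat p.1) []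

-- _TABLE[elapsed_time % len(_TABLE)]; the index is always in range (0 ≤ t < 22),
-- so the .getD "" branch is never taken (Python would raise only out of range).
def get_traffic_light_state_alt (elapsed_time : Int) : String :=
  (PySem.List.pyGet? pvTable (PySem.Int.mod elapsed_time (pvTable.length : Int))).getD ""

-- ===== PRECONDITION & SPEC =====
def Spec_get_traffic_light_state (elapsed_time : Int) (out : String) : Prop := out = get_traffic_light_state_alt elapsed_time
instance (elapsed_time : Int) (out : String) : Decidable (Spec_get_traffic_light_state elapsed_time out) := by unfold Spec_get_traffic_light_state; infer_instance

-- ===== CLAIM (what is proved, stated in full; the proofs are below) =====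
def Claim_equal_get_traffic_light_state : Prop := ∀ (elapsed_time : Int), Dom_get_traffic_light_state elapsed_time → Spec_get_traffic_light_state elapsed_time (get_traffic_light_state elapsed_time)

-- ===== LEMMAS AND PROOFS =====

theorem pvTable_len : (pvTable.length : Int) = 22 := by decide

-- both ports depend on the input only through t = elapsed_time % 22, and agree for each t ∈ [0, 22)
theorem pv_agree_on_mod (t : Int) (h0 : 0 ≤ t) (h1 : t < 22) :
    pvLoopA t pvTrafficSeq 0 = (PySem.List.pyGet? pvTable t).getD "" := by
  interval_cases t <;> decide

-- ===== VERDICT (by name: the statement is the Claim_ definition above) =====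
theorem get_traffic_light_state_spec : Claim_equal_get_traffic_light_state := by
  intro e _
  show get_traffic_light_state e = get_traffic_light_state_alt e
  unfold get_traffic_light_state get_traffic_light_state_alt
  rw [pvTable_len]
  have hc : pvTrafficSeq.foldl (fun a p => a + p.2) 0 = (22 : Int) := by decide
  rw [hc]
  exact pv_agree_on_mod _ (PySem.Int.mod_nonneg _ (by norm_num)) (PySem.Int.mod_lt _ (by norm_num))
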